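-- pv_equiv track=rewrite | github.com/killown/waypanel | src/plugins/experimental/network_manager.py | parse_nmcli_output
-- ===== SOURCE A (Python) =====
-- def parse_nmcli_output(raw_output):
--     """Parse raw nmcli device show output into list of device sections."""
--     devices = []
--     current_device = {}
--     lines = raw_output.strip().splitlines()
--     for line in lines:
--         line = line.strip()
--         if not line:
--             if current_device:
--                 if current_device.get("GENERAL.DEVICE") != "lo":
--                     devices.append(current_device)
--                 current_device = {}
--             continue
--         if ":" in line:
--             key, value = line.split(":", 1)
--             current_device[key.strip()] = value.strip()
--     if current_device:
--         if current_device.get("GENERAL.DEVICE") != "lo":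
--             devices.append(current_device)
--     return devices
-- ===== SOURCE B (Python) =====
-- def _parse_block(block):
--     """Turn one block of non-blank lines into a dict of its 'key: value' lines."""
--     section = {}
--     for line in block:
--         if ":" in line:
--             key, value = line.split(":", 1)
--             section[key.strip()] = value.strip()
--     return section
--
--
-- def parse_nmcli_output(raw_output):
--     """Parse raw nmcli device show output into list of device sections."""
--     # Phase 1: partition the stripped lines into blank-separated blocks.
--     blocks = []
--     block = []
--     for raw in raw_output.strip().splitlines():
--         line = raw.strip()
--         if line:
--             block.append(line)
--         else:
--             if block:
--                 blocks.append(block)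
--             block = []
--     if block:
--         blocks.append(block)
--     # Phase 2: parse each block, keep non-empty sections that are not 'lo'.
--     sections = [_parse_block(b) for b in blocks]
--     return [d for d in sections if d and d.get("GENERAL.DEVICE") != "lo"]
-- ===== Notes on version B (the rewrite author's own statement) =====
-- stated objective: alternative
-- what changed: Replaces A's single stateful loop (running dict plus duplicated flush-on-blank / end-of-input logic) with a two-phase decomposition: first partition the stripped lines into blank-separated blocks, then parse each block into a dict and filter out empty and loopback sections.
import Mathlib
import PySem

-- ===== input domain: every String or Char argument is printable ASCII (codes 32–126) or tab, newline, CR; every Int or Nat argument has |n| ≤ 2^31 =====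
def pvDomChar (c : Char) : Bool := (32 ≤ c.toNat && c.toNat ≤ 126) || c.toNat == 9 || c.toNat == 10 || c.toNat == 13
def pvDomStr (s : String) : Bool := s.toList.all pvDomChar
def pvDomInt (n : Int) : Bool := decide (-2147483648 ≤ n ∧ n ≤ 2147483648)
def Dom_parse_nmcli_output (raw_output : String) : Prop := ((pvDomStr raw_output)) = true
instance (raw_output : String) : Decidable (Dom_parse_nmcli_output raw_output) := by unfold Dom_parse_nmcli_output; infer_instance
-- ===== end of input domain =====

-- B replaces A's single stateful loop (running dict + flush-on-blank logic) by a two-phase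
-- decomposition: split the stripped lines into blank-separated blocks, then parse each block
-- into a section dict and keep the non-empty, non-'lo' ones (objective: alternative).


-- ===== PORT A =====
-- loop body of A: process one line into the (devices, current_device) state
def pvStepA (st : List (PySem.Dict String String) × PySem.Dict String String) (l : String) :
    List (PySem.Dict String String) × PySem.Dict String String :=
  let line := PySem.Str.strip l
  if line = "" then
    if st.2.items.isEmpty then st
    else if st.2.get? "GENERAL.DEVICE" ≠ some "lo" then (st.1 ++ [st.2], PySem.Dict.empty)
    else (st.1, PySem.Dict.empty)
  else if PySem.Str.isIn ":" line then
    match PySem.Str.splitMax? line ":" 1 with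
    | some [k, v] => (st.1, st.2.insert (PySem.Str.strip k) (PySem.Str.strip v))
    | _ => (st.1, st.2)  -- unreachable: ':' in line gives exactly two parts
  else st

-- A's trailing flush of current_device after the loop
def pvFlushA (st : List (PySem.Dict String String) × PySem.Dict String String) :
    List (PySem.Dict String String) :=
  if st.2.items.isEmpty then st.1
  else if st.2.get? "GENERAL.DEVICE" ≠ some "lo" then st.1 ++ [st.2]
  else st.1

def parse_nmcli_output (raw_output : String) : List (List (String × String)) :=
  (pvFlushA ((PySem.Str.splitlines (PySem.Str.strip raw_output)).foldl pvStepA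
    ([], PySem.Dict.empty))).map (·.items)

-- ===== PORT B =====
-- Phase 1: partition the stripped lines into blank-separated blocks (Source B's first loop)
def pvSplitBlocks : List String → List String → List (List String)
  | [], blk => if blk.isEmpty then [] else [blk]
  | raw :: rest, blk =>
      let line := PySem.Str.strip raw
      if line = "" then
        if blk.isEmpty then pvSplitBlocks rest []
        else blk :: pvSplitBlocks rest []
      else pvSplitBlocks rest (blk ++ [line])

-- Phase 2 helper: _parse_block
def pvParseBlock (block : List String) : PySem.Dict String String :=
  block.foldl (fun d line =>
    if PySem.Str.isIn ":" line then
      match PySem.Str.splitMax? line ":" 1 with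
      | some [k, v] => d.insert (PySem.Str.strip k) (PySem.Str.strip v)
      | _ => d
    else d) PySem.Dict.empty

-- final filter: 'd and d.get("GENERAL.DEVICE") != "lo"'
def pvKeep (d : PySem.Dict String String) : Bool :=
  !d.items.isEmpty && d.get? "GENERAL.DEVICE" != some "lo"

def parse_nmcli_output_alt (raw_output : String) : List (List (String × String)) :=
  ((((pvSplitBlocks (PySem.Str.splitlines (PySem.Str.strip raw_output)) []).map
    pvParseBlock).filter pvKeep).map (·.items))

-- ===== PRECONDITION & SPEC =====
def Spec_parse_nmcli_output (raw_output : String) (out : List (List (String × String))) : Prop := out = parse_nmcli_output_alt raw_output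
instance (raw_output : String) (out : List (List (String × String))) : Decidable (Spec_parse_nmcli_output raw_output out) := by unfold Spec_parse_nmcli_output; infer_instance

-- ===== CLAIM (what is proved, stated in full; the proofs are below) =====
def Claim_equal_parse_nmcli_output : Prop := ∀ (raw_output : String), Dom_parse_nmcli_output raw_output → Spec_parse_nmcli_output raw_output (parse_nmcli_output raw_output)

-- ===== LEMMAS AND PROOFS =====

-- an empty section dict is THE empty dict
theorem pvDict_eq_empty_of_items_isEmpty (d : PySem.Dict String String)
    (h : d.items.isEmpty = true) : d = PySem.Dict.empty := by
  apply PySem.Dict.ext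
  simpa [List.isEmpty_iff] using h

theorem pvKeep_of_empty (d : PySem.Dict String String)
    (h : d.items.isEmpty = true) : pvKeep d = false := by
  simp [pvKeep, h]

-- A's trailing flush, phrased through B's filter predicate
theorem pvFlush_eq (devices : List (PySem.Dict String String)) (d : PySem.Dict String String) :
    pvFlushA (devices, d) = devices ++ (if pvKeep d then [d] else []) := by
  by_cases he : d.items.isEmpty
  · simp [pvFlushA, pvKeep, he]
  · by_cases hlo : d.get? "GENERAL.DEVICE" = some "lo" <;>
      simp [pvFlushA, pvKeep, he, hlo]

-- appending one line to a pending block composes with the parse fold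
theorem pvParseBlock_append (blk : List String) (line : String) :
    pvParseBlock (blk ++ [line]) =
      (if PySem.Str.isIn ":" line then
        match PySem.Str.splitMax? line ":" 1 with
        | some [k, v] => (pvParseBlock blk).insert (PySem.Str.strip k) (PySem.Str.strip v)
        | _ => pvParseBlock blk
      else pvParseBlock blk) := by
  simp only [pvParseBlock, List.foldl_append, List.foldl_cons, List.foldl_nil]

-- B's pipeline on the empty line list
theorem pvPipe_nil (blk : List String) :
    ((pvSplitBlocks [] blk).map pvParseBlock).filter pvKeep =
      (if pvKeep (pvParseBlock blk) then [pvParseBlock blk] else []) := by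
  by_cases hb : blk.isEmpty
  · have hblk : blk = [] := by simpa [List.isEmpty_iff] using hb
    subst hblk
    have : pvKeep (pvParseBlock []) = false := pvKeep_of_empty _ rfl
    simp [pvSplitBlocks, this]
  · simp only [pvSplitBlocks, if_neg hb, List.map_cons, List.map_nil, List.filter]
    by_cases hk : pvKeep (pvParseBlock blk) <;> simp [hk]

-- B's pipeline steps over a blank line by flushing the pending block
theorem pvPipe_blank (l : String) (ls blk : List String) (hline : PySem.Str.strip l = "") :
    ((pvSplitBlocks (l :: ls) blk).map pvParseBlock).filter pvKeep =
      (if pvKeep (pvParseBlock blk) then [pvParseBlock blk] else []) ++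
        ((pvSplitBlocks ls []).map pvParseBlock).filter pvKeep := by
  by_cases hb : blk.isEmpty
  · have hblk : blk = [] := by simpa [List.isEmpty_iff] using hb
    subst hblk
    have : pvKeep (pvParseBlock []) = false := pvKeep_of_empty _ rfl
    simp [pvSplitBlocks, hline, this]
  · simp only [pvSplitBlocks, hline, if_neg hb]
    by_cases hk : pvKeep (pvParseBlock blk) <;> simp [hk]

-- B's pipeline only depends on the pending block through its parsed dict
theorem pvPipe_congr (ls : List String) : ∀ (blk1 blk2 : List String),
    pvParseBlock blk1 = pvParseBlock blk2 →
    ((pvSplitBlocks ls blk1).map pvParseBlock).filter pvKeep =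
      ((pvSplitBlocks ls blk2).map pvParseBlock).filter pvKeep := by
  induction ls with
  | nil =>
    intro blk1 blk2 h
    rw [pvPipe_nil, pvPipe_nil, h]
  | cons l ls ih =>
    intro blk1 blk2 h
    by_cases hline : PySem.Str.strip l = ""
    · rw [pvPipe_blank l ls blk1 hline, pvPipe_blank l ls blk2 hline, h]
    · simp only [pvSplitBlocks, if_neg hline]
      exact ih _ _ (by rw [pvParseBlock_append, pvParseBlock_append, h])

-- the main invariant: A's loop from (devices, parse-of-pending-block) is B's pipeline
theorem pvMain (ls : List String) : ∀ (devices : List (PySem.Dict String String))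
    (blk : List String),
    pvFlushA (ls.foldl pvStepA (devices, pvParseBlock blk)) =
      devices ++ ((pvSplitBlocks ls blk).map pvParseBlock).filter pvKeep := by
  induction ls with
  | nil =>
    intro devices blk
    rw [List.foldl_nil, pvPipe_nil, pvFlush_eq]
  | cons l ls ih =>
    intro devices blk
    rw [List.foldl_cons]
    by_cases hline : PySem.Str.strip l = ""
    · rw [pvPipe_blank l ls blk hline]
      by_cases he : (pvParseBlock blk).items.isEmpty
      · have hd : pvParseBlock blk = PySem.Dict.empty :=
          pvDict_eq_empty_of_items_isEmpty _ he
        rw [show pvStepA (devices, pvParseBlock blk) l = (devices, pvParseBlock blk) by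
              simp [pvStepA, hline, he]]
        rw [ih devices blk, pvPipe_congr ls blk [] (by rw [hd]; rfl),
            pvKeep_of_empty _ he]
        simp
      · by_cases hlo : (pvParseBlock blk).get? "GENERAL.DEVICE" = some "lo"
        · rw [show pvStepA (devices, pvParseBlock blk) l = (devices, PySem.Dict.empty) by
                simp [pvStepA, hline, he, hlo]]
          rw [show (PySem.Dict.empty : PySem.Dict String String) = pvParseBlock [] from rfl,
              ih devices []]
          have hk : pvKeep (pvParseBlock blk) = false := by simp [pvKeep, he, hlo]
          simp [hk]
        · rw [show pvStepA (devices, pvParseBlock blk) l =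
                (devices ++ [pvParseBlock blk], PySem.Dict.empty) by
                simp [pvStepA, hline, he, hlo]]
          rw [show (PySem.Dict.empty : PySem.Dict String String) = pvParseBlock [] from rfl,
              ih (devices ++ [pvParseBlock blk]) []]
          have hk : pvKeep (pvParseBlock blk) = true := by simp [pvKeep, he, hlo]
          simp [hk]
    · have hstep : pvStepA (devices, pvParseBlock blk) l =
          (devices, pvParseBlock (blk ++ [PySem.Str.strip l])) := by
        rw [pvParseBlock_append]
        simp only [pvStepA, if_neg hline]
        split
        · split <;> rfl
        · rfl
      rw [hstep, ih devices (blk ++ [PySem.Str.strip l])]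
      simp only [pvSplitBlocks, if_neg hline]

-- ===== VERDICT (by name: the statement is the Claim_ definition above) =====
theorem parse_nmcli_output_spec : Claim_equal_parse_nmcli_output := by
  intro raw _
  unfold Spec_parse_nmcli_output parse_nmcli_output parse_nmcli_output_alt
  rw [show (PySem.Dict.empty : PySem.Dict String String) = pvParseBlock [] from rfl,
      pvMain (PySem.Str.splitlines (PySem.Str.strip raw)) [] []]
  rw [List.nil_append]
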